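-- pv_equiv track=rewrite | github.com/akashgpt/helpful_scripts | qmd/setup_INPUT/stitch_two_phase_vasp.py | parse_species_order
-- ===== SOURCE A (Python) =====
-- def parse_species_order(species_order_text: str) -> list[str]:
-- 	"""Parse an optional explicit species order string.
--
-- 	Args:
-- 		species_order_text: User-provided species order text.
--
-- 	Returns:
-- 		Species labels in the requested order. Returns an empty list if the
-- 		input text is empty.
--
-- 	Raises:
-- 		ValueError: If duplicate species labels are present.
-- 	"""
-- 	species_order: list[str] = [
-- 		token for token in species_order_text.strip().split() if token
-- 	]
-- 	if not species_order:
-- 		return []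
-- 	if len(species_order) != len(set(species_order)):
-- 		raise ValueError("The requested species order contains duplicates.")
-- 	return species_order
-- ===== SOURCE B (Python) =====
-- def parse_species_order(species_order_text: str) -> list[str]:
--     """Sort the tokens and scan adjacent pairs for equality to detect
--     duplicates (comparison-based, no hash set), then return the tokens
--     in their original order."""
--     tokens = species_order_text.strip().split()
--     ordered = sorted(tokens)
--     for prev, cur in zip(ordered, ordered[1:]):
--         if prev == cur:
--             raise ValueError("The requested species order contains duplicates.")
--     return tokens
-- ===== Notes on version B (the rewrite author's own statement) =====
-- stated objective: alternative
-- what changed: B detects duplicates by sorting the tokens and scanning adjacent pairs for equality (comparison-based, no set at all), instead of A's hash-set cardinality comparison len(list) != len(set(list)); B also returns the token list directly with no empty-list branch and no redundant truthiness filter.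
import Mathlib
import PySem

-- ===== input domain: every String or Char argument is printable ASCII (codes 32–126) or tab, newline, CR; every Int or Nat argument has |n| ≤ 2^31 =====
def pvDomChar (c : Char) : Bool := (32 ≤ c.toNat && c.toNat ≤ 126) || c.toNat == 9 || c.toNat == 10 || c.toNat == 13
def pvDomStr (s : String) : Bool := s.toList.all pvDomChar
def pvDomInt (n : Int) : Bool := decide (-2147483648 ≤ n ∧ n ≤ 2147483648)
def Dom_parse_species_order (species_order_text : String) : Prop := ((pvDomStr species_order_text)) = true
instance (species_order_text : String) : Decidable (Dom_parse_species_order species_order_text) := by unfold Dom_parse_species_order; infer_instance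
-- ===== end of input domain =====

-- B detects duplicates by sorting the tokens and scanning adjacent pairs (no set), returning the
-- tokens directly; same values everywhere A returns (objective: alternative).

-- ===== PORT A =====
def parse_species_order (species_order_text : String) : List String :=
  let species_order := (PySem.Str.split₀ (PySem.Str.strip species_order_text)).filter (fun token => token ≠ "")
  if species_order = [] then []
  else if species_order.length ≠ (PySem.Set.ofList species_order).length then
    []  -- raise ValueError("The requested species order contains duplicates."); excluded by Pre_
  else species_order

-- ===== PORT B =====
-- the 'for prev, cur in zip(ordered, ordered[1:])' loop: true on the first equal adjacent pair
def pvAdjDup : List String → Bool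
  | a :: b :: rest => if a = b then true else pvAdjDup (b :: rest)
  | _ => false

def parse_species_order_alt (species_order_text : String) : List String :=
  let tokens := PySem.Str.split₀ (PySem.Str.strip species_order_text)
  let ordered := PySem.List.sorted tokens (fun x => x) false
  if pvAdjDup ordered then
    []  -- raise ValueError("The requested species order contains duplicates."); excluded by Pre_
  else tokens

-- ===== PRECONDITION & SPEC =====
-- Pre_ excludes exactly the inputs with a duplicated species token, on which A raises ValueError.
def Pre_parse_species_order (species_order_text : String) : Prop :=
  ((PySem.Str.split₀ (PySem.Str.strip species_order_text)).filter (fun token => token ≠ "")).Nodup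
instance (species_order_text : String) : Decidable (Pre_parse_species_order species_order_text) := by
  unfold Pre_parse_species_order; infer_instance
def pvWitness_parse_species_order : String := " H  O C "

def Spec_parse_species_order (species_order_text : String) (out : List String) : Prop := out = parse_species_order_alt species_order_text
instance (species_order_text : String) (out : List String) : Decidable (Spec_parse_species_order species_order_text out) := by unfold Spec_parse_species_order; infer_instance

-- ===== CLAIM (what is proved, stated in full; the proofs are below) =====
def Claim_equal_parse_species_order : Prop := ∀ (species_order_text : String), Dom_parse_species_order species_order_text → Pre_parse_species_order species_order_text → Spec_parse_species_order species_order_text (parse_species_order species_order_text)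

-- ===== LEMMAS AND PROOFS =====

-- s.split() yields no empty pieces (invariant of split₀.go: cur.reverse is pushed only when nonempty)
theorem pv_go_ne_nil (s cur : List Char) (acc : List (List Char))
    (hacc : ∀ a ∈ acc, a ≠ []) :
    ∀ x ∈ PySem.Chars.split₀.go s cur acc, x ≠ [] := by
  induction s generalizing cur acc with
  | nil =>
    intro x hx
    unfold PySem.Chars.split₀.go at hx
    split at hx
    · exact hacc x (List.mem_reverse.mp hx)
    · rcases List.mem_cons.mp (List.mem_reverse.mp hx) with h | h
      · next hne =>
        subst h
        simpa using (by simpa [List.isEmpty_iff] using hne : cur ≠ [])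
      · exact hacc x h
  | cons c rest ih =>
    intro x hx
    unfold PySem.Chars.split₀.go at hx
    split at hx
    · split at hx
      · exact ih [] acc hacc x hx
      · next hne =>
        refine ih [] (cur.reverse :: acc) ?_ x hx
        intro a ha
        rcases List.mem_cons.mp ha with rfl | ha
        · simpa using (by simpa [List.isEmpty_iff] using hne : cur ≠ [])
        · exact hacc a ha
    · exact ih (c :: cur) acc hacc x hx

theorem pv_split₀_ne_empty (s : String) : ∀ t ∈ PySem.Str.split₀ s, t ≠ "" := by
  intro t ht
  simp only [PySem.Str.split₀, List.mem_map] at ht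
  obtain ⟨cs, hcs, rfl⟩ := ht
  have hne := pv_go_ne_nil s.toList [] [] (by simp) cs hcs
  intro h
  apply hne
  have := congrArg String.toList h
  simpa using this

theorem pv_filter_id (s : String) :
    (PySem.Str.split₀ s).filter (fun token => token ≠ "") = PySem.Str.split₀ s := by
  apply List.filter_eq_self.mpr
  intro t ht
  simpa using pv_split₀_ne_empty s t ht

theorem pv_foldl_add_of_nodup (xs : List String) (s : List String) (h : xs.Nodup)
    (hd : ∀ x ∈ xs, x ∉ s) : xs.foldl PySem.Set.add s = s ++ xs := by
  induction xs generalizing s with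
  | nil => simp
  | cons x xs ih =>
    have hx : PySem.Set.add s x = s ++ [x] := by
      have := hd x (by simp)
      simp [PySem.Set.add, PySem.Set.contains, this]
    simp only [List.foldl_cons, hx]
    rw [ih (s ++ [x]) h.of_cons (fun y hy => by
      simp only [List.mem_append, List.mem_singleton]
      rintro (hs | rfl)
      · exact hd y (by simp [hy]) hs
      · exact (List.nodup_cons.mp h).1 hy)]
    simp

theorem pv_ofList_of_nodup (xs : List String) (h : xs.Nodup) : PySem.Set.ofList xs = xs := by
  rw [PySem.Set.ofList_eq_foldl, pv_foldl_add_of_nodup xs [] h (by simp)]; simp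

-- the adjacent-pair scan finds nothing on a list with distinct elements
theorem pv_adjDup_of_nodup (l : List String) (h : l.Nodup) : pvAdjDup l = false := by
  induction l with
  | nil => rfl
  | cons a t ih =>
    cases t with
    | nil => rfl
    | cons b rest =>
      have hab : a ≠ b := by
        intro h'
        exact (List.nodup_cons.mp h).1 (h' ▸ List.mem_cons_self)
      simp only [pvAdjDup, if_neg hab]
      exact ih (List.nodup_cons.mp h).2

-- ===== VERDICT (by name: the statement is the Claim_ definition above) =====
theorem parse_species_order_spec : Claim_equal_parse_species_order := by
  intro s _ hpre
  unfold Pre_parse_species_order at hpre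
  rw [pv_filter_id] at hpre
  unfold Spec_parse_species_order parse_species_order parse_species_order_alt
  simp only [pv_filter_id]
  have hsortnd : (PySem.List.sorted (PySem.Str.split₀ (PySem.Str.strip s)) (fun x => x) false).Nodup :=
    ((PySem.List.sorted_perm _ _ _).symm).nodup hpre
  rw [pv_adjDup_of_nodup _ hsortnd]
  simp only [Bool.false_eq_true, if_false]
  split_ifs with h1 h2
  · rw [h1]
  · exact absurd (by rw [pv_ofList_of_nodup _ hpre]) h2
  · rfl
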